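-- pv_equiv track=rewrite | github.com/saraalexramos/Python-Programming | part04-33_everything_reversed/src/everything_reversed.py | everything_reversed
-- ===== SOURCE A (Python) =====
-- def everything_reversed(list):
--     list2 = []
--     for i in range (len(list)):
--         word = list[i]
--         wordf = word[::-1]
--         list2.append(wordf)
--
--     list2 = list2[::-1]
--
--     return list2
-- ===== SOURCE B (Python) =====
-- def everything_reversed(list):
--     stack = []
--     for word in list:
--         stack.append(word)
--     out = []
--     while stack:
--         word = stack.pop()
--         chars = [c for c in word]
--         rev = []
--         while chars:
--             rev.append(chars.pop())
--         out.append(''.join(rev))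
--     return out
-- ===== Notes on version B (the rewrite author's own statement) =====
-- stated objective: alternative
-- what changed: B uses no slicing or list reversal at all: it pushes the words onto an explicit stack and pops them to emit the output in reverse order, reversing each word by popping a per-word character stack; both reversals come from LIFO pops instead of A's word slices plus final whole-list slice.
import Mathlib
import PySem

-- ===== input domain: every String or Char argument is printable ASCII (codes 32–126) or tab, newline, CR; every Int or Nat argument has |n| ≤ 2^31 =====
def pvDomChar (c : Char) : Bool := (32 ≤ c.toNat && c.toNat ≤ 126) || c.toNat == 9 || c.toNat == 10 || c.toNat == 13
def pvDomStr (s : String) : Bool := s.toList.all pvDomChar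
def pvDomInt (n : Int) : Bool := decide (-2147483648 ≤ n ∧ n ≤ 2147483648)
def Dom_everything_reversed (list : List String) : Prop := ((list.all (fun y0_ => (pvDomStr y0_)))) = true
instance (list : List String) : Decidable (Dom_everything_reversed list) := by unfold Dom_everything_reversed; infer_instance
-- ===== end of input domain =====

-- B uses no slicing or list reversal: an explicit stack of words popped to emit the output,
-- and a per-word character stack popped to reverse each word (alternative; same asymptotic cost).

-- ===== PORT A =====
def everything_reversed (list : List String) : List String :=
  let list2 := (PySem.List.pyRange 0 (PySem.List.len list) 1).foldl
    (fun list2 i =>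
      let word := PySem.List.pyGetD list i ""
      let wordf := (PySem.Str.slice? word none none (-1)).getD ""
      list2 ++ [wordf]) []
  (PySem.List.slice? list2 none none (-1)).getD []

-- ===== PORT B =====
-- 'while stack: x = stack.pop(); out.append(f(x))' — both of B's pop loops are this shape
def drainStack {A B : Type} (f : A → B) : List A → List B → List B
  | [], out => out
  | a :: s, out =>
      drainStack f ((a :: s).dropLast) (out ++ [f ((a :: s).getLast (by simp))])
termination_by s => s.length
decreasing_by simp

def everything_reversed_alt (list : List String) : List String :=
  let stack := list.foldl (fun stack word => stack ++ [word]) []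
  drainStack (fun word => String.ofList (drainStack id word.toList [])) stack []

-- ===== PRECONDITION & SPEC =====
def Spec_everything_reversed (list : List String) (out : List String) : Prop := out = everything_reversed_alt list
instance (list : List String) (out : List String) : Decidable (Spec_everything_reversed list out) := by unfold Spec_everything_reversed; infer_instance

-- ===== CLAIM (what is proved, stated in full; the proofs are below) =====
def Claim_equal_everything_reversed : Prop := ∀ (list : List String), Dom_everything_reversed list → Spec_everything_reversed list (everything_reversed list)

-- ===== LEMMAS AND PROOFS =====

theorem drainStack_eq {A B : Type} (f : A → B) (s : List A) (out : List B) :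
    drainStack f s out = out ++ (s.reverse.map f) := by
  induction s using List.reverseRecOn generalizing out with
  | nil => simp [drainStack]
  | append_singleton xs x ih =>
      cases xs with
      | nil => simp only [List.nil_append]; rw [drainStack]; simp [drainStack]
      | cons y ys =>
          rw [show (y :: ys) ++ [x] = y :: (ys ++ [x]) by simp]
          rw [drainStack]
          rw [show (y :: (ys ++ [x])).dropLast = y :: ys by
                simpa using List.dropLast_concat (l₁ := y :: ys) (b := x)]
          rw [ih]
          rw [show (y :: (ys ++ [x])).getLast (by simp) = x by
                simp]
          simp

theorem foldl_append_singleton {A : Type} (l : List A) (init : List A) :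
    l.foldl (fun acc x => acc ++ [x]) init = init ++ l := by
  induction l generalizing init with
  | nil => simp
  | cons h t ih => simp [List.foldl_cons, ih]

theorem flatMap_singleton_eq_map {A B : Type} (f : A → B) (l : List A) :
    l.flatMap (fun x => [f x]) = l.map f := by
  induction l with
  | nil => rfl
  | cons h t ih => simp only [List.flatMap_cons, List.map_cons, List.singleton_append, ih]

-- ===== VERDICT (by name: the statement is the Claim_ definition above) =====
theorem everything_reversed_spec : Claim_equal_everything_reversed := by
  intro list _
  unfold Spec_everything_reversed everything_reversed everything_reversed_alt
  rw [PySem.List.foldl_pyRange_zero_pyGetD list "" (fun acc w =>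
        acc ++ [(PySem.Str.slice? w none none (-1)).getD ""]) []]
  rw [PySem.List.foldl_append_eq_flatMap]
  rw [foldl_append_singleton, drainStack_eq]
  simp only [PySem.List.slice?_none_none_neg_one, PySem.Str.slice?_none_none_neg_one,
    Option.getD_some, List.nil_append]
  rw [flatMap_singleton_eq_map, ← List.map_reverse]
  refine List.map_congr_left ?_
  intro w _
  rw [drainStack_eq]
  simp
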